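-- pv_equiv track=rewrite | github.com/kangminlee-maker/umis | umis_rag/utils/guestimation.py | _is_similar_product_type
-- ===== SOURCE A (Python) =====
-- def _is_similar_product_type(type1: str, type2: str) -> bool:
--     """
--     제품 유형 유사성 판단
--
--     Args:
--         type1, type2: 제품 유형
--
--     Returns:
--         유사 여부
--     """
--     similar_groups = [
--         {'physical', 'hardware', 'device'},
--         {'digital', 'software', 'app'},
--         {'service', 'platform'}
--     ]
--
--     for group in similar_groups:
--         if type1 in group and type2 in group:
--             return True
--
--     return False
-- ===== SOURCE B (Python) =====
-- _SIMILAR_PAIRS = frozenset(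
--     (a, b)
--     for group in (
--         ('physical', 'hardware', 'device'),
--         ('digital', 'software', 'app'),
--         ('service', 'platform'),
--     )
--     for a in group
--     for b in group
-- )
--
--
-- def _is_similar_product_type(type1: str, type2: str) -> bool:
--     return (type1, type2) in _SIMILAR_PAIRS
-- ===== Notes on version B (the rewrite author's own statement) =====
-- stated objective: alternative
-- what changed: B materialises the similarity relation itself as a precomputed flat set of ordered word pairs (cross product within each group) and decides the predicate by a single pair-membership test, instead of looping over groups and testing each name's membership per group.
import Mathlib
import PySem

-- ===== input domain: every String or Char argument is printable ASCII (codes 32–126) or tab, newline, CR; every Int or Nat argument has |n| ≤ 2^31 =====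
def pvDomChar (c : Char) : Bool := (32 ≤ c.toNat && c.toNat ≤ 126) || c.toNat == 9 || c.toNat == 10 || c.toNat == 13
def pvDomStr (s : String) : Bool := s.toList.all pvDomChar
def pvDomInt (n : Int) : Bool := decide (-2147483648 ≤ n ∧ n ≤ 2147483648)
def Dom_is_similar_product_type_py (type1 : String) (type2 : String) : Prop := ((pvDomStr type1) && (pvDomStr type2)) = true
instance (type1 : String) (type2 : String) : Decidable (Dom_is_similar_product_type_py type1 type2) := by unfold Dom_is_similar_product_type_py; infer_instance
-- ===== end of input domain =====

-- B materialises the similarity relation as one precomputed set of ordered word pairs and answers with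
-- a single pair-membership test, instead of A's loop over groups with per-name membership tests (alternative).

-- ===== PORT A =====
def pvSimilarGroups : List (PySem.Set String) :=
  [PySem.Set.ofList ["physical", "hardware", "device"],
   PySem.Set.ofList ["digital", "software", "app"],
   PySem.Set.ofList ["service", "platform"]]

def pvGroupLoop (type1 : String) (type2 : String) : List (PySem.Set String) → Bool
  | [] => false
  | g :: rest =>
      if PySem.Set.contains g type1 && PySem.Set.contains g type2 then true
      else pvGroupLoop type1 type2 rest

def is_similar_product_type_py (type1 : String) (type2 : String) : Bool :=
  pvGroupLoop type1 type2 pvSimilarGroups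

-- ===== PORT B =====
-- the cross product within each group, flattened (Source B's frozenset comprehension, in loop order)
def pvSimilarPairs : PySem.Set (String × String) :=
  PySem.Set.ofList
    ((["physical", "hardware", "device"].flatMap fun a =>
        ["physical", "hardware", "device"].map fun b => (a, b)) ++
     (["digital", "software", "app"].flatMap fun a =>
        ["digital", "software", "app"].map fun b => (a, b)) ++
     (["service", "platform"].flatMap fun a =>
        ["service", "platform"].map fun b => (a, b)))

def is_similar_product_type_py_alt (type1 : String) (type2 : String) : Bool :=
  PySem.Set.contains pvSimilarPairs (type1, type2)

-- ===== PRECONDITION & SPEC =====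
def Spec_is_similar_product_type_py (type1 : String) (type2 : String) (out : Bool) : Prop := out = is_similar_product_type_py_alt type1 type2
instance (type1 : String) (type2 : String) (out : Bool) : Decidable (Spec_is_similar_product_type_py type1 type2 out) := by unfold Spec_is_similar_product_type_py; infer_instance

-- ===== CLAIM (what is proved, stated in full; the proofs are below) =====
def Claim_equal_is_similar_product_type_py : Prop := ∀ (type1 : String) (type2 : String), Dom_is_similar_product_type_py type1 type2 → Spec_is_similar_product_type_py type1 type2 (is_similar_product_type_py type1 type2)

-- ===== LEMMAS AND PROOFS =====
theorem pv_pair_beq (t1 t2 a b : String) : ((t1, t2) == (a, b)) = (t1 == a && t2 == b) := rfl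

-- ===== VERDICT (by name: the statement is the Claim_ definition above) =====
theorem is_similar_product_type_py_spec : Claim_equal_is_similar_product_type_py := by
  intro t1 t2 _
  unfold Spec_is_similar_product_type_py is_similar_product_type_py is_similar_product_type_py_alt
  have hg : pvSimilarGroups =
      [["physical", "hardware", "device"], ["digital", "software", "app"], ["service", "platform"]] := by decide
  have hp : pvSimilarPairs =
      [("physical","physical"),("physical","hardware"),("physical","device"),
       ("hardware","physical"),("hardware","hardware"),("hardware","device"),
       ("device","physical"),("device","hardware"),("device","device"),
       ("digital","digital"),("digital","software"),("digital","app"),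
       ("software","digital"),("software","software"),("software","app"),
       ("app","digital"),("app","software"),("app","app"),
       ("service","service"),("service","platform"),
       ("platform","service"),("platform","platform")] := by decide
  rw [hg, hp]
  simp only [pvGroupLoop, PySem.Set.contains, List.contains_cons, List.contains_nil,
    pv_pair_beq, Bool.or_false]
  generalize (t1 == "physical") = a1
  generalize (t1 == "hardware") = a2
  generalize (t1 == "device") = a3
  generalize (t1 == "digital") = a4
  generalize (t1 == "software") = a5
  generalize (t1 == "app") = a6
  generalize (t1 == "service") = a7
  generalize (t1 == "platform") = a8
  generalize (t2 == "physical") = b1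
  generalize (t2 == "hardware") = b2
  generalize (t2 == "device") = b3
  generalize (t2 == "digital") = b4
  generalize (t2 == "software") = b5
  generalize (t2 == "app") = b6
  generalize (t2 == "service") = b7
  generalize (t2 == "platform") = b8
  revert a1 a2 a3 a4 a5 a6 a7 a8 b1 b2 b3 b4 b5 b6 b7 b8
  decide
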